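-- pv_equiv track=rewrite | github.com/robinonsay/BarkBright | barkbright/parsing.py | split_on_conj
-- ===== SOURCE A (Python) =====
-- from typing import List, Tuple
--
-- CONJUNCTIONS = {
--     "and",
--     "then",
--     "so",
-- }
--
-- def split_on_conj(phrase: str) -> List[str]:
--     words = phrase.split()
--     sub_phrases = list()
--     current = list()
--     for word in words:
--         if word in CONJUNCTIONS:
--             if current:
--                 sub_phrases.append(' '.join(current))
--                 current.clear()
--         else:
--             current.append(word)
--     sub_phrases.append(' '.join(current))
--     return sub_phrases
-- ===== SOURCE B (Python) =====
-- from typing import List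
--
-- CONJUNCTIONS = {
--     "and",
--     "then",
--     "so",
-- }
--
-- def split_on_conj(phrase: str) -> List[str]:
--     def go(ws):
--         i = 0
--         while i < len(ws) and ws[i] not in CONJUNCTIONS:
--             i += 1
--         if i == len(ws):
--             return [' '.join(ws)]
--         pre, rest = ws[:i], ws[i + 1:]
--         if not pre:
--             return go(rest)
--         return [' '.join(pre)] + go(rest)
--     return go(phrase.split())
-- ===== Notes on version B (the rewrite author's own statement) =====
-- stated objective: alternative
-- what changed: Replaced A's single pass with a mutable (sub_phrases, current) accumulator pair by a recursive segment decomposition: repeatedly split the word list at the first conjunction, emit the joined prefix if non-empty, and recurse on the remainder (the final segment is always emitted).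
import Mathlib
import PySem

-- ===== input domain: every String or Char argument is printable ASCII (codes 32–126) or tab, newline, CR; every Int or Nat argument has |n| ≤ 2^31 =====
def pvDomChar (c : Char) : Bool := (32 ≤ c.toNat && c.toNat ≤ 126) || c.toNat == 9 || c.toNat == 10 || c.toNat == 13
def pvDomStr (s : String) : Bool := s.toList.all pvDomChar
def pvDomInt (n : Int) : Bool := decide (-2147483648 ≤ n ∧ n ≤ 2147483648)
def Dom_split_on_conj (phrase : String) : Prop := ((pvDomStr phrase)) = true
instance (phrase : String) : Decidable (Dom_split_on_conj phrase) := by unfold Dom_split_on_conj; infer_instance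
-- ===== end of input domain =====

-- B replaces A's one-pass (sub_phrases, current)-accumulator loop by a recursive
-- split-at-first-conjunction decomposition (objective: alternative, same cost).

-- ===== PORT A =====
-- membership in the CONJUNCTIONS set
def sconjIsConj (w : String) : Bool := w == "and" || w == "then" || w == "so"

def split_on_conj (phrase : String) : List String :=
  let words := PySem.Str.split₀ phrase
  let st := words.foldl
    (fun (st : List String × List String) word =>
      if sconjIsConj word then
        (if st.2 ≠ [] then (st.1 ++ [PySem.Str.join " " st.2], ([] : List String)) else st)
      else (st.1, st.2 ++ [word]))
    (([] : List String), ([] : List String))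
  st.1 ++ [PySem.Str.join " " st.2]

-- ===== PORT B =====
-- go: take the prefix up to the first conjunction; if there is none, emit the joined
-- remainder; otherwise emit the joined prefix (if non-empty) and recurse past the conjunction.
def sconjGo (ws : List String) : List String :=
  match h : ws.dropWhile (fun w => !sconjIsConj w) with
  | [] => [PySem.Str.join " " (ws.takeWhile (fun w => !sconjIsConj w))]
  | _ :: rest =>
    let pre := ws.takeWhile (fun w => !sconjIsConj w)
    if pre = [] then sconjGo rest else PySem.Str.join " " pre :: sconjGo rest
termination_by ws.length
decreasing_by
  all_goals
    have hle := List.length_dropWhile_le (fun w => !sconjIsConj w) ws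
    rw [h] at hle; simp at hle; omega

def split_on_conj_alt (phrase : String) : List String :=
  sconjGo (PySem.Str.split₀ phrase)

-- ===== PRECONDITION & SPEC =====
def Spec_split_on_conj (phrase : String) (out : List String) : Prop := out = split_on_conj_alt phrase
instance (phrase : String) (out : List String) : Decidable (Spec_split_on_conj phrase out) := by unfold Spec_split_on_conj; infer_instance

-- ===== CLAIM (what is proved, stated in full; the proofs are below) =====
def Claim_equal_split_on_conj : Prop := ∀ (phrase : String), Dom_split_on_conj phrase → Spec_split_on_conj phrase (split_on_conj phrase)

-- ===== LEMMAS AND PROOFS =====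

-- unfolding lemmas for the well-founded sconjGo
lemma sconjGo_of_drop_nil (ws : List String)
    (hdrop : ws.dropWhile (fun w => !sconjIsConj w) = []) :
    sconjGo ws = [PySem.Str.join " " (ws.takeWhile (fun w => !sconjIsConj w))] := by
  rw [sconjGo.eq_def]
  split
  · rfl
  · rename_i x rest heq; rw [hdrop] at heq; exact absurd heq (by simp)

lemma sconjGo_of_drop_cons (ws : List String) (x : String) (rest : List String)
    (hdrop : ws.dropWhile (fun w => !sconjIsConj w) = x :: rest) :
    sconjGo ws = if ws.takeWhile (fun w => !sconjIsConj w) = [] then sconjGo rest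
      else PySem.Str.join " " (ws.takeWhile (fun w => !sconjIsConj w)) :: sconjGo rest := by
  rw [sconjGo.eq_def]
  split
  · rename_i heq; rw [hdrop] at heq; exact absurd heq (by simp)
  · rename_i x' rest' heq
    rw [hdrop] at heq
    obtain ⟨rfl, rfl⟩ : x' = x ∧ rest' = rest := by
      constructor <;> injection heq <;> simp_all
    rfl

-- A's loop starting from state (sub, cur), with cur containing no conjunction words,
-- finishes to sub ++ sconjGo (cur ++ ws).
lemma sconj_loop_eq (ws : List String) : ∀ (sub cur : List String),
    (∀ w ∈ cur, sconjIsConj w = false) →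
    (let st := ws.foldl
        (fun (st : List String × List String) word =>
          if sconjIsConj word then
            (if st.2 ≠ [] then (st.1 ++ [PySem.Str.join " " st.2], ([] : List String)) else st)
          else (st.1, st.2 ++ [word]))
        (sub, cur);
      st.1 ++ [PySem.Str.join " " st.2]) = sub ++ sconjGo (cur ++ ws) := by
  induction ws with
  | nil =>
    intro sub cur hcur
    have hdrop : cur.dropWhile (fun w => !sconjIsConj w) = [] := by
      rw [List.dropWhile_eq_nil_iff]
      intro x hx; simp [hcur x hx]
    have htake : cur.takeWhile (fun w => !sconjIsConj w) = cur := by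
      rw [List.takeWhile_eq_self_iff]
      intro x hx; simp [hcur x hx]
    rw [List.append_nil, sconjGo_of_drop_nil cur hdrop, htake]
    simp
  | cons w ws ih =>
    intro sub cur hcur
    simp only [List.foldl_cons]
    by_cases hc : sconjIsConj w = true
    · by_cases hne : cur = []
      · subst hne
        simp only [hc, if_true, ne_eq, not_true_eq_false, if_false]
        rw [ih sub [] (by simp)]
        simp only [List.nil_append]
        -- sconjGo (w :: ws) = sconjGo ws since w is a conjunction and the prefix is empty
        have hdrop : (w :: ws).dropWhile (fun w => !sconjIsConj w) = w :: ws := by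
          rw [List.dropWhile_cons_of_neg (by simp [hc])]
        rw [sconjGo_of_drop_cons (w :: ws) w ws hdrop,
          List.takeWhile_cons_of_neg (by simp [hc])]
        simp
      · simp only [hc, if_true, ne_eq, hne, not_false_eq_true, if_true]
        rw [ih (sub ++ [PySem.Str.join " " cur]) [] (by simp)]
        have hcurP : ∀ x ∈ cur, (fun w => !sconjIsConj w) x = true := by
          intro x hx; simp [hcur x hx]
        have hdrop : (cur ++ w :: ws).dropWhile (fun w => !sconjIsConj w) = w :: ws := by
          rw [List.dropWhile_append_of_pos hcurP, List.dropWhile_cons_of_neg (by simp [hc])]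
        have htake : (cur ++ w :: ws).takeWhile (fun w => !sconjIsConj w) = cur := by
          rw [List.takeWhile_append_of_pos hcurP, List.takeWhile_cons_of_neg (by simp [hc])]
          simp
        rw [sconjGo_of_drop_cons (cur ++ w :: ws) w ws hdrop, htake, if_neg hne]
        simp
    · simp only [hc, if_false, Bool.false_eq_true]
      rw [ih sub (cur ++ [w]) (by
        intro x hx
        rcases List.mem_append.mp hx with h1 | h1
        · exact hcur x h1
        · simp at h1; subst h1; simpa using hc)]
      simp

-- ===== VERDICT (by name: the statement is the Claim_ definition above) =====
theorem split_on_conj_spec : Claim_equal_split_on_conj := by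
  intro phrase _
  unfold Spec_split_on_conj split_on_conj split_on_conj_alt
  simpa using sconj_loop_eq (PySem.Str.split₀ phrase) [] [] (by simp)
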